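-- pv_equiv track=rewrite | github.com/opencv/opencv | platforms/android/aar-creating/build_static_aar.py | merge_dependencies_lists
-- ===== SOURCE A (Python) =====
-- def merge_dependencies_lists(deps_lists):
--     result = []
--     for d_list in deps_lists:
--         for i in range(len(d_list)):
--             if d_list[i] not in result:
--                 if i == 0:
--                     result.append(d_list[i])
--                 else:
--                     index = result.index(d_list[i-1])
--                     result = result[:index + 1] + [d_list[i]] + result[index + 1:]
--
--     return result
-- ===== SOURCE B (Python) =====
-- def merge_dependencies_lists(deps_lists):
--     # Linked-list merge: O(1) membership (set), O(1) predecessor lookup and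
--     # insertion (dict of successor pointers) instead of A's O(n) scans/splices.
--     nxt = {}          # node -> its successor in the merged order
--     head = None
--     tail = None
--     seen = set()
--     for d_list in deps_lists:
--         for i in range(len(d_list)):
--             item = d_list[i]
--             if item not in seen:
--                 seen.add(item)
--                 if i == 0:
--                     if tail is None:
--                         head = item
--                     else:
--                         nxt[tail] = item
--                     tail = item
--                 else:
--                     prev = d_list[i - 1]
--                     nx = nxt.get(prev)
--                     nxt[prev] = item
--                     if nx is None:
--                         tail = item
--                     else:
--                         nxt[item] = nx
--     out = []
--     cur = head
--     while cur is not None: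
--         out.append(cur)
--         cur = nxt.get(cur)
--     return out
-- ===== Notes on version B (the rewrite author's own statement) =====
-- stated objective: faster
-- what changed: Replaces A's repeated linear scans and list splicing (membership test, list.index, slice-concatenation per element) with a linked list of successor pointers in a dict plus a seen-set, giving O(1) membership, predecessor lookup and insertion; the merged order is read off by one walk at the end.
import Mathlib
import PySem

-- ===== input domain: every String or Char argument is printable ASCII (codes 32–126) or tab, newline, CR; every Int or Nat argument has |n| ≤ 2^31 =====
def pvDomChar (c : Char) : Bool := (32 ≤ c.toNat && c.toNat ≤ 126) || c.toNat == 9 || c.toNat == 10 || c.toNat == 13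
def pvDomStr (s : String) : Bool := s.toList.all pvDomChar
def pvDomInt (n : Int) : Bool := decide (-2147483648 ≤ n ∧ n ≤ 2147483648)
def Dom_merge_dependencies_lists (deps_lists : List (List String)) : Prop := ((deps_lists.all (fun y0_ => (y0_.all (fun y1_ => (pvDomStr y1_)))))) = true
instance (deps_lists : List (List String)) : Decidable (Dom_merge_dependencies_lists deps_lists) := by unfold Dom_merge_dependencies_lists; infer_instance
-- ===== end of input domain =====

-- B replaces A's quadratic list-splicing merge by a successor-pointer linked list
-- (dict) with a seen-set: O(1) membership, predecessor lookup and insertion.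

-- ===== PORT A =====
-- one iteration of A's inner `for i in range(len(d_list))` body.
-- `result.index(d_list[i-1])` is ported as `(index? …).getD 0`; on every state the
-- loop reaches, d_list[i-1] is already in result (proved below), so Python's
-- .index never raises and the total form is exact.
def aBody (d_list : List String) (result : List String) (i : Nat) : List String :=
  let x := d_list.getD i ""          -- d_list[i], i < len d_list in range
  if x ∈ result then result
  else if i = 0 then result ++ [x]
  else
    let prev := d_list.getD (i-1) ""
    let index := (PySem.List.index? result prev).getD 0
    result.take (index+1) ++ [x] ++ result.drop (index+1)

def merge_dependencies_lists (deps_lists : List (List String)) : List String :=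
  deps_lists.foldl (fun result d_list => (List.range d_list.length).foldl (aBody d_list) result) []

-- ===== PORT B =====
-- state of Source B's loops: (nxt, head, tail, seen)
def bBody (d_list : List String) (st : PySem.Dict String String × Option String × Option String × PySem.Set String) (i : Nat) :
    PySem.Dict String String × Option String × Option String × PySem.Set String :=
  match st with
  | (nxt, head, tail, seen) =>
    let item := d_list.getD i ""
    if PySem.Set.contains seen item then (nxt, head, tail, seen)
    else
      let seen' := PySem.Set.add seen item
      if i = 0 then
        match tail with
        | none => (nxt, some item, some item, seen')
        | some t => (nxt.insert t item, head, some item, seen')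
      else
        let prev := d_list.getD (i-1) ""
        match nxt.get? prev with
        | none => (nxt.insert prev item, head, some item, seen')
        | some nx => ((nxt.insert prev item).insert item nx, head, tail, seen')

-- Source B's final `while cur is not None` walk; the fuel |seen| bounds the walk
-- (the chain visits each inserted node at most once, proved below), so this
-- total form computes exactly what the Python while-loop does.
def bWalk (nxt : PySem.Dict String String) : Nat → Option String → List String
  | 0, _ => []
  | _ + 1, none => []
  | f + 1, some c => c :: bWalk nxt f (nxt.get? c)

def merge_dependencies_lists_alt (deps_lists : List (List String)) : List String :=
  match deps_lists.foldl (fun st d_list => (List.range d_list.length).foldl (bBody d_list) st)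
      (PySem.Dict.empty, none, none, PySem.Set.empty) with
  | (nxt, head, _tail, seen) => bWalk nxt seen.length head

-- ===== PRECONDITION & SPEC =====
def Spec_merge_dependencies_lists (deps_lists : List (List String)) (out : List String) : Prop := out = merge_dependencies_lists_alt deps_lists
instance (deps_lists : List (List String)) (out : List String) : Decidable (Spec_merge_dependencies_lists deps_lists out) := by unfold Spec_merge_dependencies_lists; infer_instance

-- ===== CLAIM (what is proved, stated in full; the proofs are below) =====
def Claim_equal_merge_dependencies_lists : Prop := ∀ (deps_lists : List (List String)), Dom_merge_dependencies_lists deps_lists → Spec_merge_dependencies_lists deps_lists (merge_dependencies_lists deps_lists)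

-- ===== LEMMAS AND PROOFS =====

-- `headOr l t` = head of l, or t if l is empty
def headOr (l : List String) (t : Option String) : Option String :=
  match l with | [] => t | b :: _ => some b

-- each element of l points (in nxt) to its successor, the last one to t
def chainD (nxt : PySem.Dict String String) : List String → Option String → Prop
  | [], _ => True
  | a :: rest, t => nxt.get? a = headOr rest t ∧ chainD nxt rest t

-- the joint invariant tying B's state to A's running result list r
def LinkInv (nxt : PySem.Dict String String) (head tail : Option String) (seen : PySem.Set String) (r : List String) : Prop :=
  r.Nodup ∧ head = r.head? ∧ tail = r.getLast? ∧ seen.Perm r ∧ chainD nxt r none ∧ (∀ y : String, y ∉ r → nxt.get? y = none)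

lemma headOr_append (u v : List String) (t : Option String) :
    headOr (u ++ v) t = headOr u (headOr v t) := by
  cases u <;> simp [headOr]

lemma chainD_append (nxt : PySem.Dict String String) (u v : List String) (t : Option String) :
    chainD nxt (u ++ v) t ↔ chainD nxt u (headOr v t) ∧ chainD nxt v t := by
  induction u with
  | nil => simp [chainD]
  | cons a u ih => simp [chainD, headOr_append, ih, and_assoc]

lemma chainD_congr (nxt nxt' : PySem.Dict String String) (l : List String) (t : Option String)
    (h : ∀ y ∈ l, nxt'.get? y = nxt.get? y) : chainD nxt l t → chainD nxt' l t := by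
  induction l with
  | nil => intro _; trivial
  | cons a l ih =>
    intro ⟨h1, h2⟩
    exact ⟨(h a (by simp)).trans h1, ih (fun y hy => h y (by simp [hy])) h2⟩

lemma bWalk_chain (nxt : PySem.Dict String String) (l : List String) :
    chainD nxt l none → ∀ f, l.length ≤ f → bWalk nxt f (headOr l none) = l := by
  induction l with
  | nil => intro _ f _; cases f <;> simp [headOr, bWalk]
  | cons a rest ih =>
    intro h f hf
    obtain ⟨h1, h2⟩ := h
    cases f with
    | zero => simp at hf
    | succ f =>
      show a :: bWalk nxt f (nxt.get? a) = a :: rest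
      rw [h1, ih h2 f (by simpa using hf)]

lemma inv_nil : LinkInv PySem.Dict.empty none none PySem.Set.empty [] := by
  refine ⟨by simp, rfl, rfl, by simp [PySem.Set.empty], trivial, fun y _ => ?_⟩
  simp [pysem]

lemma inv_cons_nil (nxt : PySem.Dict String String) (head : Option String) (seen : PySem.Set String) (x : String)
    (hInv : LinkInv nxt head none seen []) :
    LinkInv nxt (some x) (some x) (PySem.Set.add seen x) [x] := by
  obtain ⟨_, _, _, hperm, _, hnone⟩ := hInv
  have hseen : seen = [] := hperm.eq_nil
  refine ⟨by simp, rfl, rfl, ?_, ⟨hnone x (by simp), trivial⟩, fun y hy => hnone y (by simp)⟩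
  subst hseen
  simp [PySem.Set.add, PySem.Set.contains]

lemma inv_snoc (nxt : PySem.Dict String String) (head tail : Option String) (seen : PySem.Set String)
    (r : List String) (p x : String)
    (hInv : LinkInv nxt head tail seen r) (hlast : r.getLast? = some p) (hx : x ∉ r) :
    LinkInv (nxt.insert p x) head (some x) (PySem.Set.add seen x) (r ++ [x]) := by
  obtain ⟨hnd, hh, ht, hperm, hch, hnone⟩ := hInv
  obtain ⟨pre, rfl⟩ := List.getLast?_eq_some_iff.mp hlast
  have hxp : x ≠ p := fun h => hx (h ▸ by simp)
  have hpnp : p ∉ pre := by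
    have h2 := hnd
    simp [List.nodup_append] at h2
    exact fun hm => h2.2 p hm rfl
  refine ⟨?_, ?_, ?_, ?_, ?_, ?_⟩
  · exact hnd.append (by simp) (by intro y hy hz; simp at hz; exact hx (hz ▸ hy))
  · rw [hh]; cases pre <;> simp
  · simp [List.getLast?_append]
  · rw [PySem.Set.add_of_not_mem (fun h => hx (hperm.mem_iff.mp h))]
    exact hperm.append_right _
  · rw [List.append_assoc, chainD_append]
    have hchpre : chainD nxt pre (headOr [p] none) := ((chainD_append nxt pre [p] none).mp hch).1
    constructor
    · refine chainD_congr _ _ _ _ (fun y hy => PySem.Dict.get?_insert_of_ne _ _ ?_) ?_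
      · exact fun h => hpnp (h ▸ hy)
      · simpa [headOr] using hchpre
    · refine ⟨PySem.Dict.get?_insert_self _ _ _, ?_, trivial⟩
      show (nxt.insert p x).get? x = headOr [] none
      rw [PySem.Dict.get?_insert_of_ne _ _ hxp]
      exact hnone x hx
  · intro y hy
    simp at hy
    rw [PySem.Dict.get?_insert_of_ne _ _ hy.2.1]
    exact hnone y (by simp; tauto)

lemma inv_mid (nxt : PySem.Dict String String) (head tail : Option String) (seen : PySem.Set String)
    (pre suf : List String) (p b x : String)
    (hInv : LinkInv nxt head tail seen (pre ++ p :: b :: suf)) (hx : x ∉ pre ++ p :: b :: suf) :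
    LinkInv ((nxt.insert p x).insert x b) head tail (PySem.Set.add seen x) (pre ++ p :: x :: b :: suf) := by
  obtain ⟨hnd, hh, ht, hperm, hch, hnone⟩ := hInv
  have hnd' := hnd
  simp [List.nodup_append, List.nodup_cons] at hnd'
  have hpp : p ∉ pre := fun hm => (hnd'.2.2 p hm).1 rfl
  have hpbs : p ∉ b :: suf := by
    intro hm; simp at hm
    rcases hm with h | h
    · exact hnd'.2.1.1.1 h
    · exact hnd'.2.1.1.2 h
  have hxpre : x ∉ pre := fun hm => hx (by simp [hm])
  have hxp : x ≠ p := fun h => hx (by simp [h])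
  have hxbs : x ∉ b :: suf := fun hm => hx (by simp at hm ⊢; tauto)
  have hperm' : (pre ++ p :: x :: b :: suf).Perm (x :: (pre ++ p :: b :: suf)) := by
    have := List.perm_middle (a := x) (l₁ := pre ++ [p]) (l₂ := b :: suf)
    simpa using this
  refine ⟨?_, ?_, ?_, ?_, ?_, ?_⟩
  · exact hperm'.nodup_iff.mpr (List.nodup_cons.mpr ⟨hx, hnd⟩)
  · rw [hh]; cases pre <;> simp
  · rw [ht]; simp [List.getLast?_append]
  · rw [PySem.Set.add_of_not_mem (fun h => hx (hperm.mem_iff.mp h))]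
    refine (hperm.append_right [x]).trans ?_
    exact (List.perm_append_singleton _ _).trans hperm'.symm
  · rw [chainD_append]
    rw [chainD_append] at hch
    obtain ⟨hchpre, hgp, hchbs⟩ := hch
    constructor
    · refine chainD_congr _ _ _ _ (fun y hy => ?_) (by simpa [headOr] using hchpre)
      have hyx : y ≠ x := fun h => hxpre (h ▸ hy)
      have hyp : y ≠ p := (hnd'.2.2 y hy).1
      rw [PySem.Dict.get?_insert_of_ne _ _ hyx, PySem.Dict.get?_insert_of_ne _ _ hyp]
    · refine ⟨?_, ?_, ?_⟩
      · show ((nxt.insert p x).insert x b).get? p = some x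
        rw [PySem.Dict.get?_insert_of_ne _ _ (Ne.symm hxp), PySem.Dict.get?_insert_self]
      · exact PySem.Dict.get?_insert_self _ _ _
      · refine chainD_congr _ _ _ _ (fun y hy => ?_) hchbs
        have hyx : y ≠ x := fun h => hxbs (h ▸ hy)
        have hyp : y ≠ p := fun h => hpbs (h ▸ hy)
        rw [PySem.Dict.get?_insert_of_ne _ _ hyx, PySem.Dict.get?_insert_of_ne _ _ hyp]
  · intro y hy
    simp at hy
    have hyx : y ≠ x := by tauto
    have hyp : y ≠ p := by tauto
    rw [PySem.Dict.get?_insert_of_ne _ _ hyx, PySem.Dict.get?_insert_of_ne _ _ hyp]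
    exact hnone y (by simp; tauto)

lemma take_succ_append (pre suf : List String) (p : String) :
    (pre ++ p :: suf).take (pre.length+1) = pre ++ [p] := by
  induction pre with
  | nil => simp
  | cons a t ih => simp [ih]

lemma drop_succ_append (pre suf : List String) (p : String) :
    (pre ++ p :: suf).drop (pre.length+1) = suf := by
  induction pre with
  | nil => simp
  | cons a t ih => simp [ih]

lemma step_inv (d_list : List String) (i : Nat) (nxt : PySem.Dict String String)
    (head tail : Option String) (seen : PySem.Set String) (r : List String)
    (hInv : LinkInv nxt head tail seen r) (hprev : i ≠ 0 → d_list.getD (i-1) "" ∈ r) :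
    ∃ nxt' head' tail' seen',
      bBody d_list (nxt, head, tail, seen) i = (nxt', head', tail', seen') ∧
      LinkInv nxt' head' tail' seen' (aBody d_list r i) ∧
      r ⊆ aBody d_list r i ∧ d_list.getD i "" ∈ aBody d_list r i := by
  have hmem := hInv.2.2.2.1.mem_iff (a := d_list.getD i "")
  by_cases hx : d_list.getD i "" ∈ r
  · have hcont : PySem.Set.contains seen (d_list.getD i "") = true :=
      (PySem.Set.contains_iff seen _).mpr (hmem.mpr hx)
    have haEq : aBody d_list r i = r := by simp only [aBody]; rw [if_pos hx]
    have hbEq : bBody d_list (nxt, head, tail, seen) i = (nxt, head, tail, seen) := by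
      simp only [bBody]; rw [if_pos hcont]
    exact ⟨nxt, head, tail, seen, hbEq, by rw [haEq]; exact hInv,
      by rw [haEq]; exact fun _ h => h, by rw [haEq]; exact hx⟩
  · have hcont' : ¬ (PySem.Set.contains seen (d_list.getD i "") = true) :=
      fun hc => hx (hmem.mp ((PySem.Set.contains_iff seen _).mp hc))
    by_cases hi : i = 0
    · have haEq : aBody d_list r i = r ++ [d_list.getD i ""] := by
        simp only [aBody]; rw [if_neg hx, if_pos hi]
      cases hrr : r with
      | nil =>
        subst hrr
        have htail : tail = none := hInv.2.2.1
        have hbEq : bBody d_list (nxt, head, tail, seen) i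
            = (nxt, some (d_list.getD i ""), some (d_list.getD i ""), PySem.Set.add seen (d_list.getD i "")) := by
          simp only [bBody]; rw [if_neg hcont', if_pos hi, htail]
        refine ⟨_, _, _, _, hbEq, ?_, by rw [haEq]; simp, by rw [haEq]; simp⟩
        rw [haEq]
        exact inv_cons_nil nxt head seen _ (htail ▸ hInv)
      | cons hd tl =>
        subst hrr
        obtain ⟨p, hp⟩ := Option.ne_none_iff_exists'.mp
          ((by simp [List.getLast?_eq_none_iff]) : (hd :: tl).getLast? ≠ none)
        have htail : tail = some p := hInv.2.2.1.trans hp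
        have hbEq : bBody d_list (nxt, head, tail, seen) i
            = ((nxt.insert p (d_list.getD i "")), head,
               some (d_list.getD i ""), PySem.Set.add seen (d_list.getD i "")) := by
          simp only [bBody]; rw [if_neg hcont', if_pos hi, htail]
        refine ⟨_, _, _, _, hbEq, ?_, by rw [haEq]; simp, by rw [haEq]; simp⟩
        rw [haEq]
        exact inv_snoc nxt head tail seen _ _ _ hInv hp hx
    · have hpm := hprev hi
      obtain ⟨k, hk⟩ := Option.isSome_iff_exists.mp
        ((PySem.List.index?_isSome_iff r (d_list.getD (i-1) "")).mpr hpm)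
      obtain ⟨pre, suf, hr, hlen, hpre⟩ := (PySem.List.index?_eq_some_iff r _ k).mp hk
      subst hlen
      have haEq : aBody d_list r i
          = pre ++ d_list.getD (i-1) "" :: d_list.getD i "" :: suf := by
        simp only [aBody]
        rw [if_neg hx, if_neg hi, hk]
        show r.take (pre.length + 1) ++ [d_list.getD i ""] ++ r.drop (pre.length + 1) = _
        rw [hr, take_succ_append, drop_succ_append]
        simp
      have hg : nxt.get? (d_list.getD (i-1) "") = headOr suf none := by
        have hc := hInv.2.2.2.2.1
        rw [hr, chainD_append] at hc
        exact hc.2.1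
      cases suf with
      | nil =>
        have hbEq : bBody d_list (nxt, head, tail, seen) i
            = ((nxt.insert (d_list.getD (i-1) "") (d_list.getD i "")), head,
               some (d_list.getD i ""), PySem.Set.add seen (d_list.getD i "")) := by
          simp only [bBody]; rw [if_neg hcont', if_neg hi, hg]; simp [headOr]
        have hlast : r.getLast? = some (d_list.getD (i-1) "") := by
          rw [hr]; exact List.getLast?_concat
        refine ⟨_, _, _, _, hbEq, ?_, ?_, ?_⟩
        · have := inv_snoc nxt head tail seen r _ _ hInv hlast hx
          rw [haEq]
          rw [hr] at this
          simpa using this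
        · rw [haEq, hr]; intro y hy; simp at hy ⊢; tauto
        · rw [haEq]; simp
      | cons b suf' =>
        have hbEq : bBody d_list (nxt, head, tail, seen) i
            = (((nxt.insert (d_list.getD (i-1) "") (d_list.getD i "")).insert (d_list.getD i "") b), head,
               tail, PySem.Set.add seen (d_list.getD i "")) := by
          simp only [bBody]; rw [if_neg hcont', if_neg hi, hg]; simp [headOr]
        refine ⟨_, _, _, _, hbEq, ?_, ?_, ?_⟩
        · rw [haEq]
          exact inv_mid nxt head tail seen pre suf' _ b _ (hr ▸ hInv) (hr ▸ hx)
        · rw [haEq, hr]; intro y hy; simp at hy ⊢; tauto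
        · rw [haEq]; simp

lemma inner_inv (d_list : List String) (n : Nat) (nxt : PySem.Dict String String)
    (head tail : Option String) (seen : PySem.Set String) (r : List String)
    (hInv : LinkInv nxt head tail seen r) :
    ∃ nxt' head' tail' seen',
      (List.range n).foldl (bBody d_list) (nxt, head, tail, seen) = (nxt', head', tail', seen') ∧
      LinkInv nxt' head' tail' seen' ((List.range n).foldl (aBody d_list) r) ∧
      r ⊆ (List.range n).foldl (aBody d_list) r ∧
      ∀ j, j < n → d_list.getD j "" ∈ (List.range n).foldl (aBody d_list) r := by
  induction n with
  | zero => exact ⟨nxt, head, tail, seen, rfl, hInv, fun _ h => h, by omega⟩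
  | succ n ih =>
    obtain ⟨nxt1, head1, tail1, seen1, hfold, hInv1, hsub1, hmemj⟩ := ih
    obtain ⟨nxt2, head2, tail2, seen2, hstep, hInv2, hsub2, hmem2⟩ :=
      step_inv d_list n nxt1 head1 tail1 seen1 _ hInv1
        (fun hn => hmemj (n-1) (by omega))
    refine ⟨nxt2, head2, tail2, seen2, ?_, ?_, ?_, ?_⟩
    · rw [List.range_succ, List.foldl_append, hfold]
      simpa using hstep
    · rw [List.range_succ, List.foldl_append]
      simpa using hInv2
    · rw [List.range_succ, List.foldl_append]
      refine hsub1.trans ?_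
      simpa using hsub2
    · intro j hj
      rw [List.range_succ, List.foldl_append]
      rcases Nat.lt_or_ge j n with h | h
      · simpa using hsub2 (hmemj j h)
      · have : j = n := by omega
        subst this
        simpa using hmem2

lemma outer_inv (ls : List (List String)) (nxt : PySem.Dict String String)
    (head tail : Option String) (seen : PySem.Set String) (r : List String)
    (hInv : LinkInv nxt head tail seen r) :
    ∃ nxt' head' tail' seen',
      ls.foldl (fun st d_list => (List.range d_list.length).foldl (bBody d_list) st) (nxt, head, tail, seen)
        = (nxt', head', tail', seen') ∧
      LinkInv nxt' head' tail' seen'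
        (ls.foldl (fun result d_list => (List.range d_list.length).foldl (aBody d_list) result) r) := by
  induction ls generalizing nxt head tail seen r with
  | nil => exact ⟨nxt, head, tail, seen, rfl, hInv⟩
  | cons d ls ih =>
    obtain ⟨nxt1, head1, tail1, seen1, hfold, hInv1, _, _⟩ :=
      inner_inv d d.length nxt head tail seen r hInv
    obtain ⟨nxt2, head2, tail2, seen2, hfold2, hInv2⟩ :=
      ih nxt1 head1 tail1 seen1 _ hInv1
    refine ⟨nxt2, head2, tail2, seen2, ?_, hInv2⟩
    simp only [List.foldl_cons]
    rw [hfold, hfold2]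

-- ===== VERDICT (by name: the statement is the Claim_ definition above) =====
theorem merge_dependencies_lists_spec : Claim_equal_merge_dependencies_lists := by
  intro deps _
  show merge_dependencies_lists deps = merge_dependencies_lists_alt deps
  obtain ⟨nxt, head, tail, seen, hfold, hInv⟩ :=
    outer_inv deps PySem.Dict.empty none none PySem.Set.empty [] inv_nil
  obtain ⟨hnd, hh, ht, hperm, hch, hnone⟩ := hInv
  have hlen : seen.length =
      (deps.foldl (fun result d_list => (List.range d_list.length).foldl (aBody d_list) result) []).length :=
    hperm.length_eq
  have hwalk := bWalk_chain nxt _ hch seen.length (le_of_eq hlen.symm)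
  have hho : headOr (deps.foldl (fun result d_list => (List.range d_list.length).foldl (aBody d_list) result) []) none
      = (deps.foldl (fun result d_list => (List.range d_list.length).foldl (aBody d_list) result) []).head? := by
    cases (deps.foldl (fun result d_list => (List.range d_list.length).foldl (aBody d_list) result) []) <;> rfl
  rw [merge_dependencies_lists_alt, hfold]
  show (deps.foldl (fun result d_list => (List.range d_list.length).foldl (aBody d_list) result) [])
      = bWalk nxt seen.length head
  rw [hh, ← hho]
  exact hwalk.symm
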